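-- pv_equiv track=rewrite | github.com/yesnoj/ScommettiamoChe | pronostici_app.py | wiki_find_next_giornata
-- ===== SOURCE A (Python) =====
-- def wiki_find_next_giornata(giornate_data):
--     candidates = [
--         (g, len(d.get("fixtures", [])))
--         for g, d in giornate_data.items()
--         if d.get("fixtures")
--     ]
--     if not candidates:
--         return max(giornate_data) + 1 if giornate_data else 1
--     full = [(g, n) for g, n in candidates if n >= 5]
--     if full:
--         return min(full)[0]
--     return min(candidates)[0]
-- ===== SOURCE B (Python) =====
-- def wiki_find_next_giornata(giornate_data):
--     # sort matchdays by number, then scan in increasing order with early return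
--     items = sorted(giornate_data.items(), key=lambda it: it[0])
--     first_any = None
--     for g, d in items:
--         fx = d.get("fixtures")
--         if not fx:
--             continue
--         if len(fx) >= 5:
--             return g
--         if first_any is None:
--             first_any = g
--     if first_any is not None:
--         return first_any
--     if items:
--         return items[-1][0] + 1
--     return 1
-- ===== Notes on version B (the rewrite author's own statement) =====
-- stated objective: alternative
-- what changed: B sorts the matchdays by number once and scans them in increasing order, returning at the FIRST entry with >=5 fixtures (remembering the first entry with any fixtures as backup), instead of A's comprehensions over the unsorted dict with min()/max() tuple selections; sortedness makes 'first hit' coincide with A's minimum.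
import Mathlib
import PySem

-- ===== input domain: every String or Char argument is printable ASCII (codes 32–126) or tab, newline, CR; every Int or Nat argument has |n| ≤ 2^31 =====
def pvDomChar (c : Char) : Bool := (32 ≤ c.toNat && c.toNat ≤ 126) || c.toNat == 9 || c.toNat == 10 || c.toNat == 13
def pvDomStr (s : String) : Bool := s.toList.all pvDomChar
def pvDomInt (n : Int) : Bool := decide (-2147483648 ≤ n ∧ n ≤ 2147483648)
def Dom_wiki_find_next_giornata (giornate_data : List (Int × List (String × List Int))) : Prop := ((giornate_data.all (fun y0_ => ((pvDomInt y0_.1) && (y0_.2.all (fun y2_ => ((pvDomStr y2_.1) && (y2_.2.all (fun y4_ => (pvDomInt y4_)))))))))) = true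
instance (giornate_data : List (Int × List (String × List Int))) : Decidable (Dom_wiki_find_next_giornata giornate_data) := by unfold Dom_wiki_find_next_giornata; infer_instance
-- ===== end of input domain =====

-- B sorts the matchdays by number once and scans them in increasing order with an early
-- return at the first full (>=5 fixtures) entry, instead of A's comprehensions plus
-- min()/max() selections (objective: alternative algorithm, similar cost).

-- ===== PORT A =====
-- d.get("fixtures", []) on the inner dict (assoc list, first match)
def pvFixtures (d : List (String × List Int)) : List Int :=
  (PySem.Dict.mk d).getD "fixtures" ([] : List Int)

def wiki_find_next_giornata (giornate_data : List (Int × List (String × List Int))) : Int :=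
  -- candidates = [(g, len(d.get("fixtures", []))) for g, d in …items() if d.get("fixtures")]
  let candidates : List (Int × Int) :=
    (giornate_data.filter (fun p => !(pvFixtures p.2).isEmpty)).map
      (fun p => (p.1, ((pvFixtures p.2).length : Int)))
  if candidates.isEmpty then
    -- return max(giornate_data) + 1 if giornate_data else 1
    if !giornate_data.isEmpty then
      match PySem.List.max? (giornate_data.map (·.1)) (fun x => x) with
      | some m => m + 1
      | none => 1   -- unreachable: the list is nonempty
    else 1
  else
    let full := candidates.filter (fun c => decide (5 ≤ c.2))
    if !full.isEmpty then
      match PySem.List.min2? full (·.1) (·.2) with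
      | some m => m.1
      | none => 0   -- unreachable: full is nonempty
    else
      match PySem.List.min2? candidates (·.1) (·.2) with
      | some m => m.1
      | none => 0   -- unreachable: candidates is nonempty

-- ===== PORT B =====
-- the for-loop over the sorted items: 'return g' at a full entry becomes 'some g';
-- falling off the loop yields first_any (an Option Int, none = Python None)
def pvScanB (items : List (Int × List (String × List Int))) (first_any : Option Int) : Option Int :=
  match items with
  | [] => first_any
  | (g, d) :: t =>
      let fx := ((PySem.Dict.mk d).get? "fixtures").getD []   -- d.get("fixtures"), falsy ↔ empty
      if fx.isEmpty then pvScanB t first_any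
      else if (5 : Int) ≤ (fx.length : Int) then some g
      else pvScanB t (match first_any with | none => some g | some x => some x)

def wiki_find_next_giornata_alt (giornate_data : List (Int × List (String × List Int))) : Int :=
  let items := PySem.List.sorted giornate_data (fun it => it.1) false
  match pvScanB items none with
  | some g => g
  | none =>
      match items.getLast? with     -- 'if items: return items[-1][0] + 1'
      | some p => p.1 + 1
      | none => 1

-- ===== PRECONDITION & SPEC =====
def Spec_wiki_find_next_giornata (giornate_data : List (Int × List (String × List Int))) (out : Int) : Prop := out = wiki_find_next_giornata_alt giornate_data
instance (giornate_data : List (Int × List (String × List Int))) (out : Int) : Decidable (Spec_wiki_find_next_giornata giornate_data out) := by unfold Spec_wiki_find_next_giornata; infer_instance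

-- ===== CLAIM (what is proved, stated in full; the proofs are below) =====
def Claim_equal_wiki_find_next_giornata : Prop := ∀ (giornate_data : List (Int × List (String × List Int))), Dom_wiki_find_next_giornata giornate_data → Spec_wiki_find_next_giornata giornate_data (wiki_find_next_giornata giornate_data)

-- ===== LEMMAS AND PROOFS =====

-- the two Bool tests, named for the proofs
def anyP (p : Int × List (String × List Int)) : Bool := !(pvFixtures p.2).isEmpty
def fullP (p : Int × List (String × List Int)) : Bool :=
  anyP p && decide ((5 : Int) ≤ ((pvFixtures p.2).length : Int))

lemma getFx_eq (d : List (String × List Int)) :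
    ((PySem.Dict.mk d).get? "fixtures").getD [] = pvFixtures d := rfl

-- characterisation of B's loop: first full key, else first_any, else first any-key
lemma scanB_eq (l : List (Int × List (String × List Int))) (fa : Option Int) :
    pvScanB l fa =
      match l.find? fullP with
      | some p => some p.1
      | none =>
          match fa with
          | some x => some x
          | none => (l.find? anyP).map (·.1) := by
  induction l generalizing fa with
  | nil => cases fa <;> rfl
  | cons p t ih =>
      obtain ⟨g, d⟩ := p
      by_cases h1 : (pvFixtures d).isEmpty
      · have ha : anyP (g, d) = false := by simp [anyP, h1]
        have hf : fullP (g, d) = false := by simp [fullP, ha]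
        simp only [pvScanB, getFx_eq, h1, if_pos, List.find?_cons, ha, hf]
        exact ih fa
      · by_cases h5 : (5 : Int) ≤ ((pvFixtures d).length : Int)
        · have hf : fullP (g, d) = true := by simp [fullP, anyP, h1, h5]
          simp [pvScanB, getFx_eq, h1, h5, hf]
        · have ha : anyP (g, d) = true := by simp [anyP, h1]
          have hf : fullP (g, d) = false := by simp [fullP, h5]
          simp only [pvScanB, getFx_eq, h1, h5, List.find?_cons, ha, hf,
            Bool.false_eq_true, if_false]
          rw [ih]
          cases hft : t.find? fullP with
          | some q => simp
          | none => cases fa <;> simp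

-- find? on a key-sorted list reaches the element with the least key among those satisfying P
lemma find?_sorted_min (l : List (Int × List (String × List Int)))
    (P : Int × List (String × List Int) → Bool) (p : Int × List (String × List Int))
    (hpw : l.Pairwise (fun a b => a.1 ≤ b.1)) (h : l.find? P = some p) :
    P p = true ∧ p ∈ l ∧ ∀ x ∈ l, P x = true → p.1 ≤ x.1 := by
  induction l with
  | nil => simp at h
  | cons a t ih =>
      rw [List.find?_cons] at h
      rw [List.pairwise_cons] at hpw
      by_cases hPa : P a = true
      · simp [hPa] at h
        subst h
        refine ⟨hPa, List.mem_cons_self, ?_⟩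
        intro x hx _
        rcases List.mem_cons.mp hx with rfl | hx
        · exact le_refl _
        · exact hpw.1 x hx
      · simp [hPa] at h
        obtain ⟨hp1, hp2, hp3⟩ := ih hpw.2 h
        refine ⟨hp1, List.mem_cons_of_mem _ hp2, ?_⟩
        intro x hx hPx
        rcases List.mem_cons.mp hx with rfl | hx
        · exact absurd hPx hPa
        · exact hp3 x hx hPx

-- the step of A's min2? fold, named so the induction stays syntactic
def pvMinStep (acc : Option (Int × Int)) (x : Int × Int) : Option (Int × Int) :=
  match acc with
  | none => some x
  | some m =>
    if (decide (x.1 < m.1) || !decide (m.1 < x.1) && decide (x.2 < m.2)) = true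
    then some x else some m

lemma min2?_eq_foldl (l : List (Int × Int)) :
    PySem.List.min2? l (·.1) (·.2) = l.foldl pvMinStep none := by
  unfold PySem.List.min2?
  apply PySem.List.foldl_congr_mem
  intro acc x _
  cases acc <;> rfl

-- the lexicographic running minimum of A's min2? fold, with its key property
lemma min2fold_spec (l : List (Int × Int)) (b : Int × Int) :
    ∃ z, l.foldl pvMinStep (some b) = some z ∧
      (z = b ∨ z ∈ l) ∧ z.1 ≤ b.1 ∧ ∀ x ∈ l, z.1 ≤ x.1 := by
  induction l generalizing b with
  | nil => exact ⟨b, rfl, Or.inl rfl, le_refl _, by simp⟩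
  | cons x t ih =>
      simp only [List.foldl_cons]
      by_cases hlt : (decide (x.1 < b.1) || !decide (b.1 < x.1) && decide (x.2 < b.2)) = true
      · obtain ⟨z, hz, hmem, hle, hall⟩ := ih x
        rw [show pvMinStep (some b) x = some x from by simp [pvMinStep, hlt]]
        refine ⟨z, hz, ?_, ?_, ?_⟩
        · rcases hmem with rfl | hm
          · exact Or.inr List.mem_cons_self
          · exact Or.inr (List.mem_cons_of_mem _ hm)
        · have : x.1 ≤ b.1 := by
            simp only [Bool.or_eq_true, Bool.and_eq_true, Bool.not_eq_true', decide_eq_true_iff,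
              decide_eq_false_iff_not] at hlt
            rcases hlt with h | ⟨h, _⟩ <;> omega
          omega
        · intro y hy
          rcases List.mem_cons.mp hy with rfl | hy
          · exact hle
          · exact hall y hy
      · obtain ⟨z, hz, hmem, hle, hall⟩ := ih b
        rw [show pvMinStep (some b) x = some b from by simp [pvMinStep, hlt]]
        refine ⟨z, hz, ?_, hle, ?_⟩
        · rcases hmem with rfl | hm
          · exact Or.inl rfl
          · exact Or.inr (List.mem_cons_of_mem _ hm)
        · intro y hy
          rcases List.mem_cons.mp hy with rfl | hy
          · have : ¬ (decide (y.1 < b.1) || !decide (b.1 < y.1) && decide (y.2 < b.2)) = true := hlt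
            simp only [Bool.or_eq_true, Bool.and_eq_true, Bool.not_eq_true', decide_eq_true_iff,
              decide_eq_false_iff_not, not_or, not_and] at this
            omega
          · exact hall y hy

lemma min2?_spec (l : List (Int × Int)) (hl : l ≠ []) :
    ∃ m, PySem.List.min2? l (·.1) (·.2) = some m ∧ m ∈ l ∧ ∀ x ∈ l, m.1 ≤ x.1 := by
  cases l with
  | nil => exact absurd rfl hl
  | cons b t =>
      obtain ⟨z, hz, hmem, hle, hall⟩ := min2fold_spec t b
      refine ⟨z, ?_, ?_, ?_⟩
      · rw [min2?_eq_foldl, List.foldl_cons]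
        exact (show pvMinStep none b = some b from rfl) ▸ hz
      · rcases hmem with rfl | hm
        · exact List.mem_cons_self
        · exact List.mem_cons_of_mem _ hm
      · intro x hx
        rcases List.mem_cons.mp hx with rfl | hx
        · exact hle
        · exact hall x hx

-- the last element of a key-sorted list carries the maximal key
lemma getLast?_sorted_max (l : List (Int × List (String × List Int)))
    (q : Int × List (String × List Int))
    (hpw : l.Pairwise (fun a b => a.1 ≤ b.1)) (h : l.getLast? = some q) :
    q ∈ l ∧ ∀ x ∈ l, x.1 ≤ q.1 := by
  induction l with
  | nil => simp at h
  | cons a t ih =>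
      rw [List.pairwise_cons] at hpw
      cases t with
      | nil =>
          simp at h
          subst h
          exact ⟨List.mem_cons_self, by simp⟩
      | cons b t' =>
          rw [List.getLast?_cons_cons] at h
          obtain ⟨hq, hall⟩ := ih hpw.2 h
          refine ⟨List.mem_cons_of_mem _ hq, ?_⟩
          intro x hx
          rcases List.mem_cons.mp hx with rfl | hx
          · exact hpw.1 q hq
          · exact hall x hx

-- the maximum of the keys (A's fallback), with its properties
lemma max?_keys_spec (ks : List Int) (hk : ks ≠ []) :
    ∃ m, PySem.List.max? ks (fun x => x) = some m ∧ m ∈ ks ∧ ∀ y ∈ ks, y ≤ m := by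
  cases hmx : PySem.List.max? ks (fun x => x) with
  | none => exact absurd ((PySem.List.max?_eq_none_iff ks (fun x => x)).mp hmx) hk
  | some m => exact ⟨m, rfl, PySem.List.max?_mem hmx, PySem.List.max?_isMax hmx⟩

-- ===== VERDICT (by name: the statement is the Claim_ definition above) =====
theorem wiki_find_next_giornata_spec : Claim_equal_wiki_find_next_giornata := by
  intro gd _
  unfold Spec_wiki_find_next_giornata wiki_find_next_giornata wiki_find_next_giornata_alt
  set s := PySem.List.sorted gd (fun it => it.1) false with hs
  have hperm : s.Perm gd := PySem.List.sorted_perm gd _ _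
  have hpw : s.Pairwise (fun a b => a.1 ≤ b.1) := PySem.List.sorted_pairwise gd _
  simp only [scanB_eq]
  -- A's candidate and full lists, rewritten as filters of gd
  have hfull : ((gd.filter anyP).map (fun p => (p.1, ((pvFixtures p.2).length : Int)))).filter
        (fun c => decide ((5:Int) ≤ c.2)) = (gd.filter fullP).map
        (fun p => (p.1, ((pvFixtures p.2).length : Int))) := by
    rw [List.filter_map, List.filter_filter]
    congr 1
    apply List.filter_congr
    intro p _
    simp [fullP, anyP, Function.comp, Bool.and_comm]
  by_cases hc : gd.filter anyP = []
  · -- no candidates anywhere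
    have hnoneAny : s.find? anyP = none := by
      rw [List.find?_eq_none]
      intro x hx
      have : x ∉ gd.filter anyP := by rw [hc]; simp
      simp only [List.mem_filter, not_and] at this
      simp [this (hperm.mem_iff.mp hx)]
    have hnoneFull : s.find? fullP = none := by
      rw [List.find?_eq_none]
      intro x hx
      have : anyP x = false := by
        have : x ∉ gd.filter anyP := by rw [hc]; simp
        simp only [List.mem_filter, not_and] at this
        simp [this (hperm.mem_iff.mp hx)]
      simp [fullP, this]
    have hc' : gd.filter (fun p => !(pvFixtures p.2).isEmpty) = [] := hc
    simp only [hc', List.map_nil, List.isEmpty_nil, if_true, hnoneFull, hnoneAny]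
    cases hgd : gd with
    | nil =>
        have hsnil : s = [] := by rw [hs, hgd]; rfl
        simp [hsnil]
    | cons a t =>
        have hsne : s ≠ [] := by
          intro h
          have hlen := hperm.length_eq
          rw [h, hgd] at hlen
          simp at hlen
        obtain ⟨q, hq⟩ := Option.ne_none_iff_exists'.mp (mt List.getLast?_eq_none_iff.mp hsne)
        obtain ⟨hqmem, hqmax⟩ := getLast?_sorted_max s q hpw hq
        obtain ⟨m, hm, hmmem, hmmax⟩ := max?_keys_spec (gd.map (·.1)) (by simp [hgd])
        have h1 : q.1 ≤ m := hmmax q.1 (List.mem_map_of_mem (hperm.mem_iff.mp hqmem))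
        have h2 : m ≤ q.1 := by
          obtain ⟨x, hxmem, rfl⟩ := List.mem_map.mp hmmem
          exact hqmax x (hperm.mem_iff.mpr hxmem)
        have hmq : m = q.1 := le_antisymm h2 h1
        subst hgd
        simp only [List.map_cons] at hm
        simp [hm, hq, hmq]
  · -- some candidate exists
    have hcne : (gd.filter anyP).map (fun p => (p.1, ((pvFixtures p.2).length : Int))) ≠ [] := by
      simpa using hc
    have hcne' : (gd.filter (fun p => !(pvFixtures p.2).isEmpty)).map
        (fun p => (p.1, ((pvFixtures p.2).length : Int))) ≠ [] := hcne
    rw [if_neg (by simpa [List.isEmpty_iff] using hcne')]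
    by_cases hf : gd.filter fullP = []
    · -- candidates but none full
      have hfe : ((gd.filter anyP).map (fun p => (p.1, ((pvFixtures p.2).length : Int)))).filter
          (fun c => decide ((5:Int) ≤ c.2)) = [] := by rw [hfull, hf]; simp
      have hnoneFull : s.find? fullP = none := by
        rw [List.find?_eq_none]
        intro x hx
        have : x ∉ gd.filter fullP := by rw [hf]; simp
        simp only [List.mem_filter, not_and] at this
        exact Bool.not_eq_true _ ▸ (by simpa using this (hperm.mem_iff.mp hx))
      -- B side: first element of s with fixtures
      have hexany : ∃ x ∈ s, anyP x = true := by
        cases hlc : gd.filter anyP with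
        | nil => exact absurd hlc hc
        | cons a t =>
            have := List.mem_filter.mp (hlc ▸ List.mem_cons_self (a := a) (l := t))
            exact ⟨a, hperm.mem_iff.mpr this.1, this.2⟩
      have hfind : ∃ p, s.find? anyP = some p := by
        cases hfa : s.find? anyP with
        | none =>
            obtain ⟨x, hx, hPx⟩ := hexany
            rw [List.find?_eq_none] at hfa
            exact absurd hPx (by simpa using hfa x hx)
        | some p => exact ⟨p, rfl⟩
      obtain ⟨p, hp⟩ := hfind
      obtain ⟨hPp, hpmem, hpmin⟩ := find?_sorted_min s anyP p hpw hp
      obtain ⟨m, hm, hmmem, hmmin⟩ :=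
        min2?_spec ((gd.filter anyP).map (fun q => (q.1, ((pvFixtures q.2).length : Int)))) hcne
      have h1 : m.1 ≤ p.1 := by
        have : (p.1, ((pvFixtures p.2).length : Int)) ∈
            (gd.filter anyP).map (fun q => (q.1, ((pvFixtures q.2).length : Int))) :=
          List.mem_map_of_mem (List.mem_filter.mpr ⟨hperm.mem_iff.mp hpmem, hPp⟩)
        exact hmmin _ this
      have h2 : p.1 ≤ m.1 := by
        obtain ⟨x, hxmem, rfl⟩ := List.mem_map.mp hmmem
        obtain ⟨hxgd, hPx⟩ := List.mem_filter.mp hxmem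
        exact hpmin x (hperm.mem_iff.mpr hxgd) hPx
      have hfe' : ((gd.filter (fun p => !(pvFixtures p.2).isEmpty)).map
          (fun p => (p.1, ((pvFixtures p.2).length : Int)))).filter
          (fun c => decide ((5:Int) ≤ c.2)) = [] := hfe
      have hm' : PySem.List.min2? ((gd.filter (fun p => !(pvFixtures p.2).isEmpty)).map
          (fun q => (q.1, ((pvFixtures q.2).length : Int)))) (·.1) (·.2) = some m := hm
      simp [hfe', hnoneFull, hp, hm', le_antisymm h1 h2]
    · -- a full candidate exists
      have hfne : ((gd.filter anyP).map (fun p => (p.1, ((pvFixtures p.2).length : Int)))).filter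
          (fun c => decide ((5:Int) ≤ c.2)) ≠ [] := by
        rw [hfull]; simpa using hf
      have hexfull : ∃ x ∈ s, fullP x = true := by
        cases hlc : gd.filter fullP with
        | nil => exact absurd hlc hf
        | cons a t =>
            have := List.mem_filter.mp (hlc ▸ List.mem_cons_self (a := a) (l := t))
            exact ⟨a, hperm.mem_iff.mpr this.1, this.2⟩
      have hfind : ∃ p, s.find? fullP = some p := by
        cases hfa : s.find? fullP with
        | none =>
            obtain ⟨x, hx, hPx⟩ := hexfull
            rw [List.find?_eq_none] at hfa
            exact absurd hPx (by simpa using hfa x hx)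
        | some p => exact ⟨p, rfl⟩
      obtain ⟨p, hp⟩ := hfind
      obtain ⟨hPp, hpmem, hpmin⟩ := find?_sorted_min s fullP p hpw hp
      obtain ⟨m, hm, hmmem, hmmin⟩ := min2?_spec _ hfne
      have h1 : m.1 ≤ p.1 := by
        have : (p.1, ((pvFixtures p.2).length : Int)) ∈
            ((gd.filter anyP).map (fun q => (q.1, ((pvFixtures q.2).length : Int)))).filter
              (fun c => decide ((5:Int) ≤ c.2)) := by
          rw [hfull]
          exact List.mem_map_of_mem (List.mem_filter.mpr ⟨hperm.mem_iff.mp hpmem, hPp⟩)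
        exact hmmin _ this
      have h2 : p.1 ≤ m.1 := by
        have := hmmem
        rw [hfull] at this
        obtain ⟨x, hxmem, rfl⟩ := List.mem_map.mp this
        obtain ⟨hxgd, hPx⟩ := List.mem_filter.mp hxmem
        exact hpmin x (hperm.mem_iff.mpr hxgd) hPx
      have hfne' : (((gd.filter (fun p => !(pvFixtures p.2).isEmpty)).map
          (fun p => (p.1, ((pvFixtures p.2).length : Int)))).filter
          (fun c => decide ((5:Int) ≤ c.2))) ≠ [] := hfne
      have hm' : PySem.List.min2? (((gd.filter (fun p => !(pvFixtures p.2).isEmpty)).map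
          (fun q => (q.1, ((pvFixtures q.2).length : Int)))).filter
          (fun c => decide ((5:Int) ≤ c.2))) (·.1) (·.2) = some m := hm
      simp [hfne', hp, hm', le_antisymm h1 h2]
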